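-- pv_equiv track=rewrite | github.com/isaacnfairplay/ducksite | ducksearch/report_parser.py | _split_top_level_statements
-- ===== SOURCE A (Python) =====
-- def _split_top_level_statements(sql_text: str) -> list[str]:
--     statements: list[str] = []
--     current: list[str] = []
--     in_string: str | None = None
--     in_line_comment = False
--     in_block_comment = False
--
--     i = 0
--     length = len(sql_text)
--     while i < length:
--         ch = sql_text[i]
--         next_ch = sql_text[i + 1] if i + 1 < length else ""
--
--         if in_string:
--             current.append(ch)
--             if ch == in_string:
--                 if next_ch == in_string:
--                     current.append(next_ch)
--                     i += 1
--                 else: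
--                     in_string = None
--         elif in_line_comment:
--             if ch == "\n":
--                 in_line_comment = False
--         elif in_block_comment:
--             if ch == "*" and next_ch == "/":
--                 i += 1
--                 in_block_comment = False
--         else:
--             if ch in {"'", '"'}:
--                 in_string = ch
--                 current.append(ch)
--             elif ch == "-" and next_ch == "-":
--                 in_line_comment = True
--                 i += 1
--             elif ch == "/" and next_ch == "*":
--                 in_block_comment = True
--                 i += 1
--             elif ch == ";":
--                 segment = "".join(current).strip()
--                 if segment:
--                     statements.append(segment)
--                 current = []
--             else:
--                 current.append(ch)
--
--         i += 1
--
--     tail = "".join(current).strip()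
--     if tail:
--         statements.append(tail)
--
--     return statements
-- ===== SOURCE B (Python) =====
-- def _split_top_level_statements(sql_text: str) -> list[str]:
--     # Token-chunk scanner: consumes whole strings/comments at once instead of a
--     # per-character flag state machine.
--     statements: list[str] = []
--     parts: list[str] = []
--     n = len(sql_text)
--     i = 0
--     while i < n:
--         ch = sql_text[i]
--         if ch == "'" or ch == '"':
--             j = i + 1
--             while j < n:
--                 if sql_text[j] == ch:
--                     if j + 1 < n and sql_text[j + 1] == ch:
--                         j += 2
--                     else:
--                         j += 1
--                         break
--                 else:
--                     j += 1
--             parts.append(sql_text[i:j])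
--             i = j
--         elif sql_text.startswith("--", i):
--             k = sql_text.find("\n", i + 2)
--             i = n if k == -1 else k + 1
--         elif sql_text.startswith("/*", i):
--             k = sql_text.find("*/", i + 2)
--             i = n if k == -1 else k + 2
--         elif ch == ";":
--             seg = "".join(parts).strip()
--             if seg:
--                 statements.append(seg)
--             parts = []
--             i += 1
--         else:
--             parts.append(ch)
--             i += 1
--     seg = "".join(parts).strip()
--     if seg:
--         statements.append(seg)
--     return statements
-- ===== Notes on version B (the rewrite author's own statement) =====
-- stated objective: alternative
-- what changed: A scans character by character with in_string/in_line_comment/in_block_comment flags; B has no state flags and consumes each quoted string or comment whole in one chunk (inner scan / str.find), appending slices and skipping comments en bloc.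
import Mathlib
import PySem

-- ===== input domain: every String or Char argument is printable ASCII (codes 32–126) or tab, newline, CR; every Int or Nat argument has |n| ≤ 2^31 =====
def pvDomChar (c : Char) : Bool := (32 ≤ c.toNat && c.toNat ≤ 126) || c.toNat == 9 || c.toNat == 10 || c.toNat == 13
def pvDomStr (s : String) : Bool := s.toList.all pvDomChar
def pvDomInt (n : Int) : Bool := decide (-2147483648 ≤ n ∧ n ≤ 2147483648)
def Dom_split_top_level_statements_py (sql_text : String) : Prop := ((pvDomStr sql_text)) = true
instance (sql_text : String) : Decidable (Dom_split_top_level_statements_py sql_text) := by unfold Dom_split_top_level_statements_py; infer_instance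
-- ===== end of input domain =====

-- B replaces A's per-character flag state machine by a token-chunk scanner that
-- consumes each quoted string / comment whole in a helper (objective: alternative).

-- ===== PORT A =====
-- A: character-by-character loop with state (in_string, in_line_comment, in_block_comment);
-- the index loop becomes structural recursion on the remaining characters, with
-- next_ch read as rest.head? (lookahead); branches in A's order.
def pvFlushA (cur : List Char) (stmts : List String) : List String :=
  let seg := PySem.Str.strip (String.mk cur)
  if seg ≠ "" then stmts ++ [seg] else stmts

def pvLoopA : List Char → Option Char → Bool → Bool → List Char → List String → List String
  | [], _, _, _, cur, stmts => pvFlushA cur stmts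
  | c :: rest, some q, inLC, inBC, cur, stmts =>
      if c = q then
        match rest with
        | c2 :: rest2 =>
            if c2 = q then pvLoopA rest2 (some q) inLC inBC (cur ++ [c, c2]) stmts
            else pvLoopA (c2 :: rest2) none inLC inBC (cur ++ [c]) stmts
        | [] => pvLoopA [] none inLC inBC (cur ++ [c]) stmts
      else pvLoopA rest (some q) inLC inBC (cur ++ [c]) stmts
  | c :: rest, none, true, inBC, cur, stmts =>
      if c = '\n' then pvLoopA rest none false inBC cur stmts
      else pvLoopA rest none true inBC cur stmts
  | c :: rest, none, false, true, cur, stmts =>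
      if c = '*' ∧ rest.head? = some '/' then pvLoopA rest.tail none false false cur stmts
      else pvLoopA rest none false true cur stmts
  | c :: rest, none, false, false, cur, stmts =>
      if c = '\'' ∨ c = '"' then pvLoopA rest (some c) false false (cur ++ [c]) stmts
      else if c = '-' ∧ rest.head? = some '-' then pvLoopA rest.tail none true false cur stmts
      else if c = '/' ∧ rest.head? = some '*' then pvLoopA rest.tail none false true cur stmts
      else if c = ';' then pvLoopA rest none false false [] (pvFlushA cur stmts)
      else pvLoopA rest none false false (cur ++ [c]) stmts
termination_by l _ _ _ _ _ => l.length
decreasing_by all_goals (simp [List.length_tail]; try omega)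

def split_top_level_statements_py (sql_text : String) : List String :=
  pvLoopA sql_text.toList none false false [] []

-- ===== PORT B =====
-- B: no state flags; each quoted string / comment is consumed whole by a helper
-- (the inner index loops of Source B become these structural recursions).

-- Source B's inner quote loop: (chars after the opening quote up to and including the
-- closing quote — doubled quotes kept, unterminated runs to the end; remaining input)
def pvTakeString (q : Char) : List Char → List Char × List Char
  | [] => ([], [])
  | c :: rest =>
      if c = q then
        match rest with
        | c2 :: rest2 =>
            if c2 = q then
              let p := pvTakeString q rest2
              (c :: c2 :: p.1, p.2)
            else ([c], rest)
        | [] => ([c], [])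
      else
        let p := pvTakeString q rest
        (c :: p.1, p.2)

-- Source B's find("\n", i+2): drop through the first newline (or to the end)
def pvSkipLine : List Char → List Char
  | [] => []
  | c :: rest => if c = '\n' then rest else pvSkipLine rest

-- Source B's find("*/", i+2): drop past the first "*/" (or to the end)
def pvSkipBlock : List Char → List Char
  | [] => []
  | c :: rest => if c = '*' ∧ rest.head? = some '/' then rest.tail else pvSkipBlock rest

-- length facts cited by pvLoopB's termination proof
theorem pvTakeString_len (q : Char) : ∀ l : List Char, (pvTakeString q l).2.length ≤ l.length := by
  intro l
  induction l using pvTakeString.induct q with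
  | case1 => simp [pvTakeString]
  | case2 rest2 ih => simp [pvTakeString]; omega
  | case3 c2 rest2 h => simp [pvTakeString, h]
  | case4 => simp [pvTakeString]
  | case5 c rest h ih =>
      rw [pvTakeString.eq_def]
      simp only [h, if_false]
      simpa using Nat.le_succ_of_le ih

theorem pvSkipLine_len : ∀ l : List Char, (pvSkipLine l).length ≤ l.length := by
  intro l; induction l with
  | nil => simp [pvSkipLine]
  | cons c rest ih => simp only [pvSkipLine]; split <;> simp <;> omega

theorem pvSkipBlock_len : ∀ l : List Char, (pvSkipBlock l).length ≤ l.length := by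
  intro l; induction l with
  | nil => simp [pvSkipBlock]
  | cons c rest ih =>
      simp only [pvSkipBlock]; split
      · simp [List.length_tail]; omega
      · simp; omega

def pvFlushB (parts : List Char) (stmts : List String) : List String :=
  let seg := PySem.Str.strip (String.mk parts)
  if seg ≠ "" then stmts ++ [seg] else stmts

def pvLoopB : List Char → List Char → List String → List String
  | [], parts, stmts => pvFlushB parts stmts
  | c :: rest, parts, stmts =>
      if c = '\'' ∨ c = '"' then
        let p := pvTakeString c rest
        pvLoopB p.2 (parts ++ c :: p.1) stmts
      else if c = '-' ∧ rest.head? = some '-' then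
        pvLoopB (pvSkipLine rest.tail) parts stmts
      else if c = '/' ∧ rest.head? = some '*' then
        pvLoopB (pvSkipBlock rest.tail) parts stmts
      else if c = ';' then
        pvLoopB rest [] (pvFlushB parts stmts)
      else pvLoopB rest (parts ++ [c]) stmts
termination_by l _ _ => l.length
decreasing_by
  · have := pvTakeString_len c rest; simp; omega
  · have h1 := pvSkipLine_len rest.tail
    have h2 : rest.tail.length ≤ rest.length := by cases rest <;> simp
    simp; omega
  · have h1 := pvSkipBlock_len rest.tail
    have h2 : rest.tail.length ≤ rest.length := by cases rest <;> simp
    simp; omega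
  · simp
  · simp

def split_top_level_statements_py_alt (sql_text : String) : List String :=
  pvLoopB sql_text.toList [] []

-- ===== PRECONDITION & SPEC =====
def Spec_split_top_level_statements_py (sql_text : String) (out : List String) : Prop := out = split_top_level_statements_py_alt sql_text
instance (sql_text : String) (out : List String) : Decidable (Spec_split_top_level_statements_py sql_text out) := by unfold Spec_split_top_level_statements_py; infer_instance

-- ===== CLAIM (what is proved, stated in full; the proofs are below) =====
def Claim_equal_split_top_level_statements_py : Prop := ∀ (sql_text : String), Dom_split_top_level_statements_py sql_text → Spec_split_top_level_statements_py sql_text (split_top_level_statements_py sql_text)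

-- ===== LEMMAS AND PROOFS =====

-- A inside a string = B's whole-string helper, then back to the neutral A state
theorem pvLoopA_string (q : Char) : ∀ (l : List Char) (inLC inBC : Bool) (cur : List Char) (stmts : List String),
    pvLoopA l (some q) inLC inBC cur stmts
      = pvLoopA (pvTakeString q l).2 none inLC inBC (cur ++ (pvTakeString q l).1) stmts := by
  intro l
  induction l using pvTakeString.induct q with
  | case1 => intro inLC inBC cur stmts; simp [pvTakeString, pvLoopA]
  | case2 rest2 ih => intro inLC inBC cur stmts; simp [pvTakeString, pvLoopA, ih]
  | case3 c2 rest2 h => intro inLC inBC cur stmts; simp [pvTakeString, pvLoopA, h]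
  | case4 => intro inLC inBC cur stmts; simp [pvTakeString, pvLoopA]
  | case5 c rest h ih =>
      intro inLC inBC cur stmts
      rw [pvTakeString.eq_def]
      simp only [h, if_false]
      rw [pvLoopA.eq_def]
      simp [h, ih]

-- A inside a line comment = B's skip-to-newline helper
theorem pvLoopA_line : ∀ (l : List Char) (inBC : Bool) (cur : List Char) (stmts : List String),
    pvLoopA l none true inBC cur stmts = pvLoopA (pvSkipLine l) none false inBC cur stmts := by
  intro l
  induction l with
  | nil => intro inBC cur stmts; simp [pvSkipLine, pvLoopA]
  | cons c rest ih =>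
      intro inBC cur stmts
      by_cases h : c = '\n' <;> simp [pvSkipLine, pvLoopA, h, ih]

-- A inside a block comment = B's skip-past-"*/" helper
theorem pvLoopA_block : ∀ (l : List Char) (cur : List Char) (stmts : List String),
    pvLoopA l none false true cur stmts = pvLoopA (pvSkipBlock l) none false false cur stmts := by
  intro l
  induction l with
  | nil => intro cur stmts; simp [pvSkipBlock, pvLoopA]
  | cons c rest ih =>
      intro cur stmts
      by_cases h : c = '*' ∧ rest.head? = some '/' <;> simp [pvSkipBlock, pvLoopA, h, ih]

-- the main invariant: A's neutral state tracks B's loop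
theorem pvLoopA_eq_pvLoopB : ∀ (l : List Char) (cur : List Char) (stmts : List String),
    pvLoopA l none false false cur stmts = pvLoopB l cur stmts := by
  intro l cur stmts
  induction l, cur, stmts using pvLoopB.induct with
  | case1 parts stmts => simp [pvLoopA, pvLoopB, pvFlushA, pvFlushB]
  | case2 c rest parts stmts hq p ih =>
      rw [pvLoopB]
      simp only [hq, if_pos]
      rw [← ih]
      rw [pvLoopA.eq_def]
      simp only [hq, if_pos]
      rw [pvLoopA_string]
      show _ = pvLoopA (pvTakeString c rest).2 none false false (parts ++ c :: (pvTakeString c rest).1) stmts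
      simp
  | case3 c rest parts stmts hq hd ih =>
      obtain ⟨hc, hh⟩ := hd
      subst hc
      rw [pvLoopB]
      simp only [hh, if_pos, and_self, if_neg hq]
      rw [← ih]
      rw [pvLoopA.eq_def]
      simp [hh, pvLoopA_line]
  | case4 c rest parts stmts hq hd hs ih =>
      obtain ⟨hc, hh⟩ := hs
      subst hc
      rw [pvLoopB]
      simp only [hh, and_self, if_pos, if_neg hq]
      rw [← ih]
      rw [pvLoopA.eq_def]
      simp [hh, pvLoopA_block]
  | case5 rest parts stmts hq hd hs ih =>
      rw [pvLoopB]
      simp only [hq, hd, hs, if_pos, if_neg, not_false_eq_true]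
      rw [← ih]
      rw [pvLoopA.eq_def]
      simp [pvFlushA, pvFlushB]
  | case6 c rest parts stmts hq hd hs hc ih =>
      rw [pvLoopB]
      simp only [hq, hd, hs, hc, if_neg, not_false_eq_true]
      rw [← ih]
      rw [pvLoopA.eq_def]
      simp [hq, hd, hs, hc]

-- ===== VERDICT (by name: the statement is the Claim_ definition above) =====
theorem split_top_level_statements_py_spec : Claim_equal_split_top_level_statements_py := by
  intro sql_text _
  unfold Spec_split_top_level_statements_py split_top_level_statements_py split_top_level_statements_py_alt
  exact pvLoopA_eq_pvLoopB sql_text.toList [] []
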